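-- pv_equiv track=rewrite | github.com/wisper12933/GA-Rollback | test_webshop/web_rollback.py | split_analysis
-- ===== SOURCE A (Python) =====
-- def split_analysis(text):
--     lines = text.split('\n')
--     content = []
--     for line in lines:
--         if 'Error Location **' in line:
--             loc = line[2:].strip()
--             content.append(loc)
--             break
--
--     for line in lines:
--         if 'Explanation **' in line:
--             anal = line[2:].strip()
--             content.append(anal)
--             break
--
--     return content
-- ===== SOURCE B (Python) =====
-- def split_analysis(text):
--     loc = None
--     anal = None
--     for line in text.split('\n'):
--         if loc is None and 'Error Location **' in line:
--             loc = line[2:].strip()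
--         if anal is None and 'Explanation **' in line:
--             anal = line[2:].strip()
--         if loc is not None and anal is not None:
--             break
--     content = []
--     if loc is not None:
--         content.append(loc)
--     if anal is not None:
--         content.append(anal)
--     return content
-- ===== Notes on version B (the rewrite author's own statement) =====
-- stated objective: simpler
-- what changed: Replaces A's two separate early-breaking scans over the lines with one single pass that tracks both first matches in two optional variables and stops once both are found, then emits [loc, anal] in fixed order.
import Mathlib
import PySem

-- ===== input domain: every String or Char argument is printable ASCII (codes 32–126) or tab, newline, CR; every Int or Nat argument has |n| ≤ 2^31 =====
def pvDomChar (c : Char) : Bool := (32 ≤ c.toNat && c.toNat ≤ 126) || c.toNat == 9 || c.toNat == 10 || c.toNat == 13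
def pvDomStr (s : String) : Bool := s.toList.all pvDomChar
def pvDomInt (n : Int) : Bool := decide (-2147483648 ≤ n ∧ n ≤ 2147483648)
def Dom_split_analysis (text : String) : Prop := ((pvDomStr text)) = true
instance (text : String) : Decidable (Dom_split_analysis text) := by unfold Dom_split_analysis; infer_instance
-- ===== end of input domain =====

-- B merges A's two early-breaking scans into one single pass holding two optional slots; same return value.

-- ===== PORT A =====
-- line[2:].strip()
def pvExtract (line : String) : String :=
  PySem.Str.strip (PySem.Str.slice line (some 2) none)

-- A's first loop: scan for 'Error Location **', append and break
def pvALoc : List String → List String → List String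
  | [], content => content
  | line :: rest, content =>
    if PySem.Str.isIn "Error Location **" line then content ++ [pvExtract line]
    else pvALoc rest content

-- A's second loop: scan for 'Explanation **', append and break
def pvAAnal : List String → List String → List String
  | [], content => content
  | line :: rest, content =>
    if PySem.Str.isIn "Explanation **" line then content ++ [pvExtract line]
    else pvAAnal rest content

def split_analysis (text : String) : List String :=
  let lines := (PySem.Str.split? text "\n").getD []
  pvAAnal lines (pvALoc lines [])

-- ===== PORT B =====
-- B's single pass: fill the two optional slots, break once both are set
def pvBLoop : List String → Option String → Option String → Option String × Option String
  | [], loc, anal => (loc, anal)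
  | line :: rest, loc, anal =>
    let loc := if loc.isNone && PySem.Str.isIn "Error Location **" line then some (pvExtract line) else loc
    let anal := if anal.isNone && PySem.Str.isIn "Explanation **" line then some (pvExtract line) else anal
    if loc.isSome && anal.isSome then (loc, anal) else pvBLoop rest loc anal

def split_analysis_alt (text : String) : List String :=
  let p := pvBLoop ((PySem.Str.split? text "\n").getD []) none none
  (match p.1 with | some v => [v] | none => []) ++
  (match p.2 with | some v => [v] | none => [])

-- ===== PRECONDITION & SPEC =====
def Spec_split_analysis (text : String) (out : List String) : Prop := out = split_analysis_alt text
instance (text : String) (out : List String) : Decidable (Spec_split_analysis text out) := by unfold Spec_split_analysis; infer_instance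

-- ===== CLAIM (what is proved, stated in full; the proofs are below) =====
def Claim_equal_split_analysis : Prop := ∀ (text : String), Dom_split_analysis text → Spec_split_analysis text (split_analysis text)

-- ===== LEMMAS AND PROOFS =====
-- first line containing the marker, extracted (proof-side characterisation)
def pvFind (m : String) : List String → Option String
  | [] => none
  | line :: rest => if PySem.Str.isIn m line then some (pvExtract line) else pvFind m rest

theorem pvALoc_eq (ls : List String) (c : List String) :
    pvALoc ls c = c ++ (pvFind "Error Location **" ls).toList := by
  induction ls generalizing c with
  | nil => simp [pvALoc, pvFind]
  | cons l rest ih => simp only [pvALoc, pvFind]; split <;> simp [ih]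

theorem pvAAnal_eq (ls : List String) (c : List String) :
    pvAAnal ls c = c ++ (pvFind "Explanation **" ls).toList := by
  induction ls generalizing c with
  | nil => simp [pvAAnal, pvFind]
  | cons l rest ih => simp only [pvAAnal, pvFind]; split <;> simp [ih]

theorem pvBLoop_eq (ls : List String) (loc anal : Option String) :
    pvBLoop ls loc anal =
      (loc.or (pvFind "Error Location **" ls), anal.or (pvFind "Explanation **" ls)) := by
  induction ls generalizing loc anal with
  | nil => simp [pvBLoop, pvFind]
  | cons l rest ih =>
    cases h1 : PySem.Str.isIn "Error Location **" l <;>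
      cases h2 : PySem.Str.isIn "Explanation **" l <;>
      cases loc <;> cases anal <;>
      simp only [pvBLoop, pvFind, h1, h2] <;>
      simp [ih]

-- ===== VERDICT (by name: the statement is the Claim_ definition above) =====
theorem split_analysis_spec : Claim_equal_split_analysis := by
  intro text _
  show split_analysis text = split_analysis_alt text
  simp only [split_analysis, split_analysis_alt, pvALoc_eq, pvAAnal_eq, pvBLoop_eq]
  cases pvFind "Error Location **" ((PySem.Str.split? text "\n").getD []) <;>
    cases pvFind "Explanation **" ((PySem.Str.split? text "\n").getD []) <;> simp
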